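-- pv_equiv track=rewrite | github.com/salvable/algorithm-practice | 프로그래머스/LV2/순위검색.py | solution
-- ===== SOURCE A (Python) =====
-- from itertools import combinations
-- from bisect import bisect_left
--
-- def solution(info, query):
--     answer = []
--     dic = dict()
--
--     for i in range(len(info)):
--         splitList = info[i].split(" ")
--         menu = splitList[:-1]
--         score = splitList[-1]
--
--         for j in range(5):
--             combi = list(combinations(menu,j))
--             for c in combi:
--                 key = "".join(c)
--                 if key in dic.keys():
--                     dic[key].append(int(score))
--                 else:
--                     dic[key] = [int(score)]
--
--     for d in dic:
--         dic[d].sort()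
--
--     for q in query:
--         splitList = q.split(" ")
--         menu = splitList[:-1]
--         score = splitList[-1]
--
--         while 'and' in menu:
--             menu.remove('and')
--
--         while '-' in menu:
--             menu.remove('-')
--
--         key = "".join(menu)
--
--         if key in dic.keys():
--             scores = dic[key]
--
--             if scores:
--                 index = bisect_left(scores,int(score))
--                 answer.append(len(scores) - index)
--         else:
--             answer.append(0)
--
--     return answer
-- ===== SOURCE B (Python) =====
-- from itertools import combinations
--
-- def solution(info, query):
--     entries = []
--     for line in info:
--         toks = line.split(" ")
--         entries.append((toks[:-1], int(toks[-1])))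
--     answer = []
--     for q in query:
--         toks = q.split(" ")
--         want = "".join(t for t in toks[:-1] if t not in ("and", "-"))
--         hits = [score for menu, score in entries
--                 for j in range(5)
--                 for c in combinations(menu, j)
--                 if "".join(c) == want]
--         if hits:
--             limit = int(toks[-1])
--             answer.append(sum(s >= limit for s in hits))
--         else:
--             answer.append(0)
--     return answer
-- ===== Notes on version B (the rewrite author's own statement) =====
-- stated objective: simpler
-- what changed: B drops A's precomputed dict of all <=4-token combination keys with per-key sorted score lists and bisect: it parses info once into (tokens, score) pairs and answers each query by a direct scan, collecting the scores of every combination that joins to the query key and counting those at or above the threshold; Pre_ excludes exactly the inputs on which int() raises ValueError in A (an info score token that does not parse, or a query score token that does not parse while some entry matches its key).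
import Mathlib
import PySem

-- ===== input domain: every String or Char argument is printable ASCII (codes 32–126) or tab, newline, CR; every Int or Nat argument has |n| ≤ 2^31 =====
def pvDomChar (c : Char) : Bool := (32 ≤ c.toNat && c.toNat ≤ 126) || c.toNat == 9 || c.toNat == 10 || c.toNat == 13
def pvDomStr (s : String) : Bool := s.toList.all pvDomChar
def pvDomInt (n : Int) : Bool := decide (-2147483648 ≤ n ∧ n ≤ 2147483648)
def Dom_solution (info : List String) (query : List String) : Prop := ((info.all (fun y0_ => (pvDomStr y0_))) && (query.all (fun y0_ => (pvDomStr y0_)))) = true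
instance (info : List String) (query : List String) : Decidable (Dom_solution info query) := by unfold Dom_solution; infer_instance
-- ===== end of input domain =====

-- B replaces A's precomputed dict of all ≤4-token combination keys (with sorted score
-- lists and bisect) by a direct per-query scan over the parsed entries; objective: simpler.

-- ===== PORT A =====

-- s.split(" ")  (sep " " ≠ "", so split? is always some)
def pvTokensA (s : String) : List String := (PySem.Str.split? s " ").getD []

-- 'while v in xs: xs.remove(v)' — fuel xs.length bounds the number of removals, so this is exact
def pvRemoveAllGo : Nat → List String → String → List String
  | 0, xs, _ => xs
  | n + 1, xs, v =>
      if xs.contains v then pvRemoveAllGo n ((PySem.List.remove? xs v).getD xs) v else xs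

def pvRemoveAll (xs : List String) (v : String) : List String := pvRemoveAllGo xs.length xs v

-- the body of 'for c in combi: …' (dic[key].append(s) / dic[key] = [s])
def pvStepA (s : Int) (d : PySem.Dict String (List Int)) (c : List String) :
    PySem.Dict String (List Int) :=
  let key := PySem.Str.join "" c
  if d.contains key then d.insert key (d.getD key [] ++ [s]) else d.insert key [s]

-- one iteration of 'for i in range(len(info))'
def pvInfoStepA (d : PySem.Dict String (List Int)) (line : String) :
    PySem.Dict String (List Int) :=
  let splitList := pvTokensA line
  let menu := PySem.List.slice splitList none (some (-1))
  let score := (PySem.List.pyGet? splitList (-1)).getD ""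
  let s := (PySem.Int.ofStr? score).getD 0   -- int(score); Pre_ guarantees the parse succeeds
  (List.range 5).foldl (fun d j => (PySem.List.combinations menu j).foldl (pvStepA s) d) d

-- 'dic[d].sort()' (in-place sort = overwrite the value; insert keeps the key's position)
def pvSortStepA (d : PySem.Dict String (List Int)) (k : String) :
    PySem.Dict String (List Int) :=
  d.insert k (PySem.List.sorted (d.getD k []) (fun x => x) false)

-- one iteration of 'for q in query'
def pvQueryStepA (d : PySem.Dict String (List Int)) (answer : List Int) (q : String) :
    List Int :=
  let splitList := pvTokensA q
  let menu := PySem.List.slice splitList none (some (-1))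
  let score := (PySem.List.pyGet? splitList (-1)).getD ""
  let menu := pvRemoveAll menu "and"
  let menu := pvRemoveAll menu "-"
  let key := PySem.Str.join "" menu
  if d.contains key then
    let scores := d.getD key []
    if scores ≠ [] then
      answer ++ [(scores.length : Int) -
        (PySem.List.bisectLeft scores ((PySem.Int.ofStr? score).getD 0) : Int)]
    else answer
  else answer ++ [0]

def solution (info : List String) (query : List String) : List Int :=
  let dic := info.foldl pvInfoStepA PySem.Dict.empty
  let dic2 := dic.keys.foldl pvSortStepA dic
  query.foldl (pvQueryStepA dic2) []

-- ===== PORT B =====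

def pvTokensB (s : String) : List String := (PySem.Str.split? s " ").getD []

-- (toks[:-1], int(toks[-1])) for one info line
def pvEntryB (line : String) : List String × Int :=
  let toks := pvTokensB line
  (PySem.List.slice toks none (some (-1)),
   (PySem.Int.ofStr? ((PySem.List.pyGet? toks (-1)).getD "")).getD 0)

-- one query: the hits comprehension, then the guarded count
def pvQueryB (entries : List (List String × Int)) (q : String) : Int :=
  let toks := pvTokensB q
  let want := PySem.Str.join ""
    ((PySem.List.slice toks none (some (-1))).filter (fun t => !(t == "and" || t == "-")))
  let hits := entries.flatMap (fun e =>
    (((List.range 5).flatMap (fun j => PySem.List.combinations e.1 j)).filter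
      (fun c => PySem.Str.join "" c == want)).map (fun _ => e.2))
  if hits ≠ [] then
    let lim := (PySem.Int.ofStr? ((PySem.List.pyGet? toks (-1)).getD "")).getD 0
    (hits.countP (fun s => decide (lim ≤ s)) : Int)
  else 0

def solution_alt (info : List String) (query : List String) : List Int :=
  query.map (pvQueryB (info.map pvEntryB))

-- ===== PRECONDITION & SPEC =====

-- the last space-separated token of s parses as a Python int (int(token) does not raise)
def pvParses (s : String) : Bool :=
  (PySem.Int.ofStr? ((PySem.List.pyGet? ((PySem.Str.split? s " ").getD []) (-1)).getD "")).isSome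

-- A query pattern key: the query tokens minus the score and the 'and'/'-' fillers, concatenated
def pvQKey (s : String) : String :=
  PySem.Str.join ""
    ((((PySem.Str.split? s " ").getD []).dropLast).filter (fun t => t != "and" && t != "-"))

-- does some combination of ≤ 4 of the info line's attribute tokens concatenate to key?
def pvMatches (line : String) (key : String) : Bool :=
  (List.range 5).any (fun j =>
    (PySem.List.combinations (((PySem.Str.split? line " ").getD []).dropLast) j).any
      (fun c => PySem.Str.join "" c == key))

-- Pre_ excludes exactly the inputs on which int() raises ValueError (in A and B alike): every
-- info score token must parse, and each query score token must parse unless no info entry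
-- matches the query's pattern (in that case neither program ever reads the query score).
def Pre_solution (info : List String) (query : List String) : Prop :=
  (∀ s ∈ info, pvParses s = true) ∧
  (∀ s ∈ query, pvParses s = true ∨ (∀ line ∈ info, pvMatches line (pvQKey s) = false))
instance (info : List String) (query : List String) : Decidable (Pre_solution info query) := by
  unfold Pre_solution; infer_instance

def pvWitness_solution : List String × List String :=
  (["java backend junior pizza 150", "python frontend senior chicken 210"],
   ["java and backend and junior and pizza 100", "- and - and - and - 150"])

def Spec_solution (info : List String) (query : List String) (out : List Int) : Prop :=
  out = solution_alt info query
instance (info : List String) (query : List String) (out : List Int) :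
    Decidable (Spec_solution info query out) := by unfold Spec_solution; infer_instance

-- ===== CLAIM (what is proved, stated in full; the proofs are below) =====
def Claim_equal_solution : Prop := ∀ (info : List String) (query : List String),
  Dom_solution info query → Pre_solution info query →
    Spec_solution info query (solution info query)


-- ===== LEMMAS AND PROOFS =====

-- number of combinations of menu tokens of length ≤ b (taken in order) whose concatenation is t
def pvCsum (m : List String) (t : String) : Nat → Nat
  | 0 => (PySem.List.combinations m 0).countP (fun c => PySem.Str.join "" c == t)
  | b + 1 => pvCsum m t b + (PySem.List.combinations m (b + 1)).countP (fun c => PySem.Str.join "" c == t)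

-- the scores an entry contributes to A's dict at key t (with multiplicity)
def pvRepl (t : String) (e : List String × Int) : List Int := List.replicate (pvCsum e.1 t 4) e.2

-- the full value list A's dict holds at key t (before sorting)
def pvL (t : String) (info : List String) : List Int := (info.map pvEntryB).flatMap (pvRepl t)

theorem pv_foldl_foldl_flatMap {β γ δ : Type} (l : List γ) (g : γ → List β)
    (step : δ → β → δ) (d : δ) :
    l.foldl (fun d j => (g j).foldl step d) d = (l.flatMap g).foldl step d := by
  induction l generalizing d with
  | nil => rfl
  | cons x xs ih => simp [List.flatMap_cons, List.foldl_append, ih]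

theorem pvStepA_modify (s : Int) (d : PySem.Dict String (List Int)) (c : List String) :
    pvStepA s d c = d.modify (PySem.Str.join "" c) [] (· ++ [s]) := by
  unfold pvStepA PySem.Dict.modify
  cases h : d.contains (PySem.Str.join "" c) with
  | true => simp [h]
  | false => simp [h, PySem.Dict.getD_of_not_contains d [] h]

theorem pv_countP_flat_range (m : List String) (t : String) (b : Nat) :
    ((List.range (b + 1)).flatMap (fun j => PySem.List.combinations m j)).countP
      (fun c => PySem.Str.join "" c == t) = pvCsum m t b := by
  induction b with
  | zero => simp [pvCsum, List.range_succ]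
  | succ b ih =>
      rw [List.range_succ, List.flatMap_append, List.countP_append, ih]
      simp [pvCsum]

-- per-entry effect on A's dict
set_option maxHeartbeats 1000000 in
theorem pvInfoStepA_fold (d : PySem.Dict String (List Int)) (line : String) :
    pvInfoStepA d line =
      ((((List.range 5).flatMap (fun j => PySem.List.combinations (pvEntryB line).1 j)).map
        (fun c => (PySem.Str.join "" c, (pvEntryB line).2))).foldl
          (fun d p => d.modify p.1 [] (· ++ [p.2])) d) := by
  have h0 : pvInfoStepA d line = (List.range 5).foldl
      (fun d j => (PySem.List.combinations (pvEntryB line).1 j).foldl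
        (pvStepA (pvEntryB line).2) d) d := rfl
  rw [h0, pv_foldl_foldl_flatMap, List.foldl_map]
  congr 1
  funext d c
  exact pvStepA_modify _ _ _

theorem pvInfoStepA_getD (d : PySem.Dict String (List Int)) (line : String) (k : String) :
    (pvInfoStepA d line).getD k [] = d.getD k [] ++ pvRepl k (pvEntryB line) := by
  rw [pvInfoStepA_fold, PySem.Dict.getD_foldl_modify_append]
  congr 1
  rw [List.filter_map, List.map_map]
  have hp : ((fun (p : String × Int) => p.1 == k) ∘ fun c => (PySem.Str.join "" c, (pvEntryB line).2))
      = fun c => PySem.Str.join "" c == k := rfl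
  have hm : ((fun (p : String × Int) => p.2) ∘ fun c => (PySem.Str.join "" c, (pvEntryB line).2))
      = fun _ => (pvEntryB line).2 := rfl
  rw [hp, hm, List.map_const', ← List.countP_eq_length_filter]
  show List.replicate (((List.range (4 + 1)).flatMap
    (fun j => PySem.List.combinations (pvEntryB line).1 j)).countP
      (fun c => PySem.Str.join "" c == k)) (pvEntryB line).2 = _
  rw [pv_countP_flat_range]
  rfl

theorem pvInfoStepA_keys (d : PySem.Dict String (List Int)) (line : String) :
    (pvInfoStepA d line).keys = PySem.Set.update d.keys
      (((List.range 5).flatMap (fun j => PySem.List.combinations (pvEntryB line).1 j)).map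
        (fun c => PySem.Str.join "" c)) := by
  rw [pvInfoStepA_fold]
  rw [PySem.Dict.keys_foldl_modify_key _ (fun (p : String × Int) => p.1) []
    (fun _ p v => v ++ [p.2])]
  rw [List.map_map]
  rfl

theorem pvInfoStepA_nodup (d : PySem.Dict String (List Int)) (line : String)
    (h : d.keys.Nodup) : (pvInfoStepA d line).keys.Nodup := by
  rw [pvInfoStepA_fold]
  exact PySem.Dict.nodup_keys_foldl_modify_key _ (fun (p : String × Int) => p.1) []
    (fun _ p v => v ++ [p.2]) d h

theorem pvInfoStepA_contains (d : PySem.Dict String (List Int)) (line : String) (k : String) :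
    (pvInfoStepA d line).contains k = true ↔
      (d.contains k = true ∨ 0 < pvCsum (pvEntryB line).1 k 4) := by
  rw [PySem.Dict.contains_iff_mem_keys, pvInfoStepA_keys, PySem.Set.mem_update,
    ← PySem.Dict.contains_iff_mem_keys]
  constructor
  · rintro (h | h)
    · exact Or.inl h
    · refine Or.inr ?_
      rcases List.mem_map.mp h with ⟨c, hc, rfl⟩
      rw [← pv_countP_flat_range]
      exact List.countP_pos_iff.mpr ⟨c, hc, by simp⟩
  · rintro (h | h)
    · exact Or.inl h
    · refine Or.inr ?_
      rw [← pv_countP_flat_range] at h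
      rcases List.countP_pos_iff.mp h with ⟨c, hc, hjc⟩
      exact List.mem_map.mpr ⟨c, hc, (beq_iff_eq.mp hjc)⟩

-- phase 1 (the info loop) characterised
theorem pv_ph1_getD (info : List String) : ∀ (d : PySem.Dict String (List Int)) (k : String),
    (info.foldl pvInfoStepA d).getD k [] = d.getD k [] ++ pvL k info := by
  induction info with
  | nil => intro d k; simp [pvL]
  | cons line rest ih =>
      intro d k
      simp only [List.foldl_cons, ih, pvInfoStepA_getD, pvL, List.map_cons, List.flatMap_cons,
        List.append_assoc]

theorem pv_ph1_nodup (info : List String) : ∀ (d : PySem.Dict String (List Int)),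
    d.keys.Nodup → (info.foldl pvInfoStepA d).keys.Nodup := by
  induction info with
  | nil => intro d h; exact h
  | cons line rest ih => intro d h; exact ih _ (pvInfoStepA_nodup d line h)

theorem pv_ph1_contains (info : List String) : ∀ (d : PySem.Dict String (List Int)) (k : String),
    (info.foldl pvInfoStepA d).contains k = true ↔
      (d.contains k = true ∨ ∃ line ∈ info, 0 < pvCsum (pvEntryB line).1 k 4) := by
  induction info with
  | nil => intro d k; simp
  | cons line rest ih =>
      intro d k
      rw [List.foldl_cons, ih, pvInfoStepA_contains]
      constructor
      · rintro (⟨h | h⟩ | ⟨l, hl, h⟩)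
        · exact Or.inl h
        · exact Or.inr ⟨line, by simp, h⟩
        · exact Or.inr ⟨l, by simp [hl], h⟩
      · rintro (h | ⟨l, hl, h⟩)
        · exact Or.inl (Or.inl h)
        · rcases List.mem_cons.mp hl with rfl | hl
          · exact Or.inl (Or.inr h)
          · exact Or.inr ⟨l, hl, h⟩

theorem pvL_ne_nil (k : String) (info : List String) :
    pvL k info ≠ [] ↔ ∃ line ∈ info, 0 < pvCsum (pvEntryB line).1 k 4 := by
  rw [pvL, Ne, List.flatMap_eq_nil_iff]
  simp [pvRepl, List.replicate_eq_nil_iff]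
  constructor
  · intro h
    rcases h with ⟨l, hl, h⟩
    exact ⟨l, hl, Nat.pos_of_ne_zero h⟩
  · rintro ⟨l, hl, h⟩
    exact ⟨l, hl, Nat.pos_iff_ne_zero.mp h⟩

-- phase 2 (the sorting loop) characterised
theorem pv_sortfold_getD (ks : List String) : ∀ (d : PySem.Dict String (List Int)) (k : String),
    ks.Nodup →
    (ks.foldl pvSortStepA d).getD k [] =
      if k ∈ ks then PySem.List.sorted (d.getD k []) (fun x => x) false else d.getD k [] := by
  induction ks with
  | nil => intro d k _; simp
  | cons k0 ks ih =>
      intro d k hnd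
      rw [List.foldl_cons, ih _ _ (List.nodup_cons.mp hnd).2]
      by_cases hk : k ∈ ks
      · have hne : k ≠ k0 := fun h => (List.nodup_cons.mp hnd).1 (h ▸ hk)
        simp [hk, hne, pvSortStepA, PySem.Dict.getD_insert, List.mem_cons]
      · by_cases he : k = k0
        · subst he
          simp [hk, pvSortStepA]
        · simp [hk, he, pvSortStepA, PySem.Dict.getD_insert, List.mem_cons]

theorem pv_sortfold_contains (ks : List String) :
    ∀ (d : PySem.Dict String (List Int)) (k : String),
    (ks.foldl pvSortStepA d).contains k = (d.contains k || ks.contains k) := by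
  induction ks with
  | nil => intro d k; simp
  | cons k0 ks ih =>
      intro d k
      rw [List.foldl_cons, ih]
      have h1 : (pvSortStepA d k0).contains k = ((k == k0) || d.contains k) := by
        simp [pvSortStepA, PySem.Dict.contains_insert]
      rw [h1, List.contains_cons]
      cases d.contains k <;> cases (k == k0) <;> cases ks.contains k <;> simp

-- bisect_left on an ascending list counts the elements below the probe
theorem pv_bisect_count (xs : List Int) (q : Int)
    (h : List.Pairwise (fun a b => a ≤ b) xs) :
    (xs.length : Int) - (PySem.List.bisectLeft xs q : Int) =
      (xs.countP (fun s => decide (q ≤ s)) : Int) := by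
  obtain ⟨hle, hlt, hge⟩ := PySem.List.bisectLeft_spec xs q h
  set i := PySem.List.bisectLeft xs q with hi
  have hsplit : xs.countP (fun s => decide (q ≤ s)) =
      (xs.take i).countP (fun s => decide (q ≤ s)) +
      (xs.drop i).countP (fun s => decide (q ≤ s)) := by
    rw [← List.countP_append, List.take_append_drop]
  have h1 : (xs.take i).countP (fun s => decide (q ≤ s)) = 0 := by
    rw [List.countP_eq_zero]
    intro a ha
    rcases List.mem_take_iff_getElem.mp ha with ⟨j, hj, rfl⟩
    have hjlen : j < xs.length := lt_of_lt_of_le (lt_min_iff.mp hj).1 hle |>.trans_le le_rfl |>.trans_le le_rfl |> fun _ => (lt_min_iff.mp hj).2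
    have := hlt j hjlen (lt_min_iff.mp hj).1
    simp only [decide_eq_true_eq]
    omega
  have h2 : (xs.drop i).countP (fun s => decide (q ≤ s)) = (xs.drop i).length := by
    rw [List.countP_eq_length]
    intro a ha
    rcases List.mem_drop_iff_getElem.mp ha with ⟨j, hj, rfl⟩
    have := hge (i + j) (by omega) (Nat.le_add_right i j)
    simpa using this
  rw [hsplit, h1, h2, List.length_drop]
  omega

-- 'while v in xs: xs.remove(v)' removes every occurrence of v
theorem pv_erase_filter (v : String) (xs : List String) :
    (xs.erase v).filter (fun t => t != v) = xs.filter (fun t => t != v) := by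
  induction xs with
  | nil => rfl
  | cons x xs ih =>
      rw [List.erase_cons]
      by_cases h : x = v
      · subst h
        rw [if_pos (by simp)]
        simp
      · rw [if_neg (by simpa using h)]
        simp [ih, h]

theorem pvRemoveAllGo_eq (v : String) : ∀ (n : Nat) (xs : List String),
    xs.count v ≤ n → pvRemoveAllGo n xs v = xs.filter (fun t => t != v) := by
  intro n
  induction n with
  | zero =>
      intro xs hc
      have hnm : v ∉ xs := List.count_eq_zero.mp (Nat.le_zero.mp hc)
      rw [pvRemoveAllGo]
      refine (List.filter_eq_self.mpr (fun a ha => ?_)).symm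
      simp only [bne_iff_ne, ne_eq]
      intro he
      exact hnm (he ▸ ha)
  | succ n ih =>
      intro xs hc
      rw [pvRemoveAllGo]
      by_cases hm : v ∈ xs
      · rw [if_pos (by simpa using hm)]
        have hrm : (PySem.List.remove? xs v).getD xs = xs.erase v := by
          rw [PySem.List.remove?, List.erase_eq_eraseIdx]
          cases List.idxOf? v xs <;> rfl
        have hcnt : (xs.erase v).count v ≤ n := by
          have h1 := List.count_erase_self (a := v) (l := xs)
          omega
        rw [hrm, ih _ hcnt]
        exact pv_erase_filter v xs
      · rw [if_neg (by simpa using hm)]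
        refine (List.filter_eq_self.mpr (fun a ha => ?_)).symm
        simp only [bne_iff_ne, ne_eq]
        intro he
        exact hm (he ▸ ha)

theorem pvRemoveAll_eq (xs : List String) (v : String) :
    pvRemoveAll xs v = xs.filter (fun t => t != v) :=
  pvRemoveAllGo_eq v xs.length xs (List.count_le_length)

theorem pvKey_eq (m : List String) :
    PySem.Str.join "" (pvRemoveAll (pvRemoveAll m "and") "-") =
      PySem.Str.join "" (m.filter (fun t => !(t == "and" || t == "-"))) := by
  rw [pvRemoveAll_eq, pvRemoveAll_eq, List.filter_filter]
  congr 1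
  apply List.filter_congr
  intro x _
  simp only [bne]
  cases hx : (x == "and") <;> cases hy : (x == "-") <;> simp

-- B's hits comprehension for one entry is that entry's contribution to A's dict value
theorem pvHits_entry (e : List String × Int) (want : String) :
    (((List.range 5).flatMap (fun j => PySem.List.combinations e.1 j)).filter
      (fun c => PySem.Str.join "" c == want)).map (fun _ => e.2) = pvRepl want e := by
  rw [List.map_const', ← List.countP_eq_length_filter]
  unfold pvRepl
  congr 1
  exact pv_countP_flat_range e.1 want 4

-- hence B's full hits list is A's (unsorted) dict value at the query key
theorem pvHits_eq (info : List String) (want : String) :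
    (info.map pvEntryB).flatMap (fun e =>
      (((List.range 5).flatMap (fun j => PySem.List.combinations e.1 j)).filter
        (fun c => PySem.Str.join "" c == want)).map (fun _ => e.2)) = pvL want info := by
  unfold pvL
  congr 1
  funext e
  exact pvHits_entry e want

-- the per-query step of A produces exactly B's count
set_option maxHeartbeats 1000000 in
theorem pv_queryStep_eq (info : List String) (ans : List Int) (q : String) :
    pvQueryStepA ((info.foldl pvInfoStepA PySem.Dict.empty).keys.foldl pvSortStepA
        (info.foldl pvInfoStepA PySem.Dict.empty)) ans q =
      ans ++ [pvQueryB (info.map pvEntryB) q] := by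
  set dic := info.foldl pvInfoStepA PySem.Dict.empty with hdic
  set dic2 := dic.keys.foldl pvSortStepA dic with hdic2
  set toks := pvTokensA q with htoks
  set menu := PySem.List.slice toks none (some (-1)) with hmenu
  set qv := (PySem.Int.ofStr? ((PySem.List.pyGet? toks (-1)).getD "")).getD 0 with hqv
  set keyA := PySem.Str.join "" (pvRemoveAll (pvRemoveAll menu "and") "-") with hkeyA
  set keyB := PySem.Str.join "" (menu.filter (fun t => !(t == "and" || t == "-"))) with hkeyB
  have hA : pvQueryStepA dic2 ans q =
      (if dic2.contains keyA then
        (if dic2.getD keyA [] ≠ [] then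
          ans ++ [((dic2.getD keyA []).length : Int) -
            (PySem.List.bisectLeft (dic2.getD keyA []) qv : Int)]
         else ans)
       else ans ++ [0]) := rfl
  have hB : pvQueryB (info.map pvEntryB) q =
      (if pvL keyB info ≠ [] then ((pvL keyB info).countP (fun s => decide (qv ≤ s)) : Int)
       else 0) := by
    show (if (info.map pvEntryB).flatMap (fun e =>
        (((List.range 5).flatMap (fun j => PySem.List.combinations e.1 j)).filter
          (fun c => PySem.Str.join "" c == keyB)).map (fun _ => e.2)) ≠ [] then
        (((info.map pvEntryB).flatMap (fun e =>
          (((List.range 5).flatMap (fun j => PySem.List.combinations e.1 j)).filter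
            (fun c => PySem.Str.join "" c == keyB)).map (fun _ => e.2))).countP
              (fun s => decide (qv ≤ s)) : Int)
      else (0 : Int)) = _
    rw [pvHits_eq]
  have hkey : keyA = keyB := by rw [hkeyA, hkeyB, pvKey_eq]
  have hnodup : dic.keys.Nodup := pv_ph1_nodup info PySem.Dict.empty PySem.Dict.nodup_keys_empty
  have hgetD : dic.getD keyA [] = pvL keyA info := by
    rw [hdic, pv_ph1_getD]
    simp [PySem.Dict.getD_empty]
  have hcont2 : dic2.contains keyA = dic.contains keyA := by
    rw [hdic2, pv_sortfold_contains]
    cases h : dic.contains keyA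
    · cases h2 : dic.keys.contains keyA
      · rfl
      · have : keyA ∈ dic.keys := List.contains_iff_mem.mp h2
        rw [← PySem.Dict.contains_iff_mem_keys] at this
        rw [h] at this
        exact absurd this (by simp)
    · simp
  have hcontIff : dic.contains keyA = true ↔ pvL keyA info ≠ [] := by
    rw [hdic, pv_ph1_contains, pvL_ne_nil]
    simp [PySem.Dict.contains_empty]
  by_cases hc : dic.contains keyA = true
  · have hkmem : keyA ∈ dic.keys := (PySem.Dict.contains_iff_mem_keys dic keyA).mp hc
    have hgetD2 : dic2.getD keyA [] = PySem.List.sorted (pvL keyA info) (fun x => x) false := by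
      rw [hdic2, pv_sortfold_getD dic.keys dic keyA hnodup, if_pos hkmem, hgetD]
    have hne : pvL keyA info ≠ [] := hcontIff.mp hc
    have hsne : dic2.getD keyA [] ≠ [] := by
      rw [hgetD2]
      simpa [PySem.List.sorted_eq_nil_iff] using hne
    rw [hA, if_pos (by rw [hcont2]; exact hc), if_pos hsne, hB, ← hkey, if_pos hne]
    congr 1
    rw [hgetD2]
    have hpw : List.Pairwise (fun a b => a ≤ b)
        (PySem.List.sorted (pvL keyA info) (fun x => x) false) := by
      simpa using PySem.List.sorted_pairwise (pvL keyA info) (fun x => x)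
    rw [pv_bisect_count _ qv hpw]
    have hperm := PySem.List.sorted_perm (pvL keyA info) (fun x => x) false
    rw [List.Perm.countP_eq _ hperm]
  · have hnil : pvL keyA info = [] := by
      by_contra hne
      exact hc (hcontIff.mpr hne)
    rw [hA, if_neg (by rw [hcont2]; exact hc), hB, ← hkey, if_neg (by simpa using hnil)]

theorem pv_ports_eq (info : List String) (query : List String) :
    solution info query = solution_alt info query := by
  unfold solution solution_alt
  have h : pvQueryStepA ((info.foldl pvInfoStepA PySem.Dict.empty).keys.foldl pvSortStepA
      (info.foldl pvInfoStepA PySem.Dict.empty)) =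
      fun ans q => ans ++ [pvQueryB (info.map pvEntryB) q] := by
    funext ans q; exact pv_queryStep_eq info ans q
  show query.foldl (pvQueryStepA ((info.foldl pvInfoStepA PySem.Dict.empty).keys.foldl
      pvSortStepA (info.foldl pvInfoStepA PySem.Dict.empty))) [] =
    query.map (pvQueryB (info.map pvEntryB))
  rw [h, PySem.List.foldl_append_singleton_eq_map]
  simp

-- ===== VERDICT (by name: the statement is the Claim_ definition above) =====
theorem solution_spec : Claim_equal_solution := by
  intro info query _ _
  unfold Spec_solution
  exact pv_ports_eq info query
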